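-- pv_equiv track=rewrite | github.com/Pagnyl/Solve-Sudoku | Sudokuentier.py | zerocarre
-- ===== SOURCE A (Python) =====
-- def zerocarre(t,l,c):
--     if l<=2 and c<=2:
--         for i in range(3):
--             for j in range(3):
--                 t[i][j]=0
--     if l<=5 and l>2 and c<=2 :
--         for i in range(3):
--             for j in range(3):
--                 t[i+3][j]=0
--     if l>5 and c<=2 :
--         for i in range(3):
--             for j in range(3):
--                 t[i+6][j]=0
--     if l<=2 and c<=5 and c>2 :
--         for i in range(3):
--             for j in range(3):
--                 t[i][j+3]=0
--     if l<=5 and l>2 and c>2 and c<=5 :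
--         for i in range(3):
--             for j in range(3):
--                 t[i+3][j+3]=0
--     if l>5 and c>2 and c<=5 :
--         for i in range(3):
--             for j in range(3):
--                 t[i+6][j+3]=0
--     if c>5 and l<=2 :
--         for i in range(3):
--             for j in range(3):
--                 t[i][j+6]=0
--     if c>5 and l<=5 and l>2 :
--         for i in range(3):
--             for j in range(3):
--                 t[i+3][j+6]=0
--     if c>5 and l>5 :
--         for i in range(3):
--             for j in range(3):
--                 t[i+6][j+6]=0
--     return(t)
-- ===== SOURCE B (Python) =====
-- def zerocarre(t, l, c):
--     # Branch-free: the box offsets are computed arithmetically from the two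
--     # threshold comparisons, and one flat loop over the 9 cells decodes each
--     # cell's (row, col) with divmod. Mutates t in place, like A.
--     bl = 3 * ((l > 2) + (l > 5))
--     bc = 3 * ((c > 2) + (c > 5))
--     for k in range(9):
--         t[bl + k // 3][bc + k % 3] = 0
--     return t
-- ===== Notes on version B (the rewrite author's own statement) =====
-- stated objective: simpler
-- what changed: Replaces the nine guarded double loops with a branch-free arithmetic computation of the box offsets (3*((l>2)+(l>5))) and a single flat loop over the 9 cells that decodes row and column by divmod.
import Mathlib
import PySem

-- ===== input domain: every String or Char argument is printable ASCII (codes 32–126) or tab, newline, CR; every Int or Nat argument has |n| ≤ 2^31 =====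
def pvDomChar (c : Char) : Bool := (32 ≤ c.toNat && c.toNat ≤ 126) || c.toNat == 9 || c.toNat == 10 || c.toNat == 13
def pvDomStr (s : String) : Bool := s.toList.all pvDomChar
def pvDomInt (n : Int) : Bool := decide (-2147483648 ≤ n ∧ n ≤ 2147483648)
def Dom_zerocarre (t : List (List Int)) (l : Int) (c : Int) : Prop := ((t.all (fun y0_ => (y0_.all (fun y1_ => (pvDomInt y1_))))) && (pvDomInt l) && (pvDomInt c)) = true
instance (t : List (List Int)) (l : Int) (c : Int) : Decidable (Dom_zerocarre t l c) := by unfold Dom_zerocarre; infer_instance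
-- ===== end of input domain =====

-- B computes the box offsets branch-free (3*((l>2)+(l>5))) and zeroes the box with one flat loop
-- over the 9 cells decoded by divmod, replacing A's nine guarded double loops (objective: simpler).
-- Both Pythons mutate t in place identically; the theorems are about the return value.


-- t[r][k] = 0 (List.set is a no-op out of range, where Python raises; no claim is made there)
def setZ (t : List (List Int)) (r k : Nat) : List (List Int) :=
  t.set r ((t.getD r []).set k 0)

-- ===== PORT A =====
def zerocarre (t : List (List Int)) (l : Int) (c : Int) : List (List Int) :=
  let t := if l ≤ 2 ∧ c ≤ 2 then
    (List.range 3).foldl (fun a i => (List.range 3).foldl (fun a j => setZ a i j) a) t else t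
  let t := if l ≤ 5 ∧ l > 2 ∧ c ≤ 2 then
    (List.range 3).foldl (fun a i => (List.range 3).foldl (fun a j => setZ a (i+3) j) a) t else t
  let t := if l > 5 ∧ c ≤ 2 then
    (List.range 3).foldl (fun a i => (List.range 3).foldl (fun a j => setZ a (i+6) j) a) t else t
  let t := if l ≤ 2 ∧ c ≤ 5 ∧ c > 2 then
    (List.range 3).foldl (fun a i => (List.range 3).foldl (fun a j => setZ a i (j+3)) a) t else t
  let t := if l ≤ 5 ∧ l > 2 ∧ c > 2 ∧ c ≤ 5 then
    (List.range 3).foldl (fun a i => (List.range 3).foldl (fun a j => setZ a (i+3) (j+3)) a) t else t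
  let t := if l > 5 ∧ c > 2 ∧ c ≤ 5 then
    (List.range 3).foldl (fun a i => (List.range 3).foldl (fun a j => setZ a (i+6) (j+3)) a) t else t
  let t := if c > 5 ∧ l ≤ 2 then
    (List.range 3).foldl (fun a i => (List.range 3).foldl (fun a j => setZ a i (j+6)) a) t else t
  let t := if c > 5 ∧ l ≤ 5 ∧ l > 2 then
    (List.range 3).foldl (fun a i => (List.range 3).foldl (fun a j => setZ a (i+3) (j+6)) a) t else t
  let t := if c > 5 ∧ l > 5 then
    (List.range 3).foldl (fun a i => (List.range 3).foldl (fun a j => setZ a (i+6) (j+6)) a) t else t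
  t

-- ===== PORT B =====
-- Indices passed to setZI are always ≥ 0 here (box offsets and divmod of 0..8), so Int.toNat is
-- exact for them; out of range, List.set is a no-op where Python raises (excluded by Pre_).
def setZI (t : List (List Int)) (r k : Int) : List (List Int) :=
  t.set r.toNat ((t.getD r.toNat []).set k.toNat 0)

def zerocarre_alt (t : List (List Int)) (l : Int) (c : Int) : List (List Int) :=
  let bl : Int := 3 * ((if 2 < l then (1:Int) else 0) + (if 5 < l then (1:Int) else 0))
  let bc : Int := 3 * ((if 2 < c then (1:Int) else 0) + (if 5 < c then (1:Int) else 0))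
  (PySem.List.pyRange 0 9 1).foldl
    (fun a k => setZI a (bl + PySem.Int.floordiv k 3) (bc + PySem.Int.mod k 3)) t

-- ===== PRECONDITION & SPEC =====
def boxOffN (x : Int) : Nat := if x ≤ 2 then 0 else if x ≤ 5 then 3 else 6

-- Pre_ excludes exactly the inputs on which Python A (and B) raises IndexError: the grid must
-- contain the three rows of the addressed box and those rows the three addressed columns.
def Pre_zerocarre (t : List (List Int)) (l : Int) (c : Int) : Prop :=
  boxOffN l + 3 ≤ t.length ∧ ∀ r ∈ (t.drop (boxOffN l)).take 3, boxOffN c + 3 ≤ r.length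
instance (t : List (List Int)) (l : Int) (c : Int) : Decidable (Pre_zerocarre t l c) := by
  unfold Pre_zerocarre; infer_instance
def pvWitness_zerocarre : List (List Int) × Int × Int :=
  ([[1,2,3],[4,5,6],[7,8,9]], 0, 1)
def Spec_zerocarre (t : List (List Int)) (l : Int) (c : Int) (out : List (List Int)) : Prop := out = zerocarre_alt t l c
instance (t : List (List Int)) (l : Int) (c : Int) (out : List (List Int)) : Decidable (Spec_zerocarre t l c out) := by unfold Spec_zerocarre; infer_instance

-- ===== CLAIM =====
def Claim_equal_zerocarre : Prop := ∀ (t : List (List Int)) (l : Int) (c : Int), Dom_zerocarre t l c → Pre_zerocarre t l c → Spec_zerocarre t l c (zerocarre t l c)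

-- ===== LEMMAS AND PROOFS =====

-- the generic box-zeroing chain each of A's nine branches instantiates
def boxZ (t : List (List Int)) (bl bc : Nat) : List (List Int) :=
  (List.range 3).foldl (fun a i => (List.range 3).foldl (fun a j => setZ a (i+bl) (j+bc)) a) t

lemma zerocarre_eq_boxZ (t : List (List Int)) (l c : Int) :
    zerocarre t l c = boxZ t (boxOffN l) (boxOffN c) := by
  unfold zerocarre
  by_cases hl2 : l ≤ 2 <;> by_cases hl5 : l ≤ 5 <;> by_cases hc2 : c ≤ 2 <;> by_cases hc5 : c ≤ 5
  ·
    have f0 := eq_true (show l ≤ (2:Int) by omega)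
    have f1 := eq_true (show l ≤ (5:Int) by omega)
    have f2 := eq_false (show ¬((2:Int) < l) by omega)
    have f3 := eq_false (show ¬((5:Int) < l) by omega)
    have f4 := eq_true (show c ≤ (2:Int) by omega)
    have f5 := eq_true (show c ≤ (5:Int) by omega)
    have f6 := eq_false (show ¬((2:Int) < c) by omega)
    have f7 := eq_false (show ¬((5:Int) < c) by omega)
    simp only [f0, f1, f2, f3, f4, f5, f6, f7, and_true, and_false, true_and, false_and,
      if_true, if_false]
    simp [boxZ, boxOffN, f0, f1, f4, f5]
  · exact absurd (show c ≤ 5 by omega) hc5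
  ·
    have f0 := eq_true (show l ≤ (2:Int) by omega)
    have f1 := eq_true (show l ≤ (5:Int) by omega)
    have f2 := eq_false (show ¬((2:Int) < l) by omega)
    have f3 := eq_false (show ¬((5:Int) < l) by omega)
    have f4 := eq_false (show ¬(c ≤ (2:Int)) by omega)
    have f5 := eq_true (show c ≤ (5:Int) by omega)
    have f6 := eq_true (show (2:Int) < c by omega)
    have f7 := eq_false (show ¬((5:Int) < c) by omega)
    simp only [f0, f1, f2, f3, f4, f5, f6, f7, and_true, and_false, true_and, false_and,
      if_true, if_false]
    simp [boxZ, boxOffN, f0, f1, f4, f5]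
  ·
    have f0 := eq_true (show l ≤ (2:Int) by omega)
    have f1 := eq_true (show l ≤ (5:Int) by omega)
    have f2 := eq_false (show ¬((2:Int) < l) by omega)
    have f3 := eq_false (show ¬((5:Int) < l) by omega)
    have f4 := eq_false (show ¬(c ≤ (2:Int)) by omega)
    have f5 := eq_false (show ¬(c ≤ (5:Int)) by omega)
    have f6 := eq_true (show (2:Int) < c by omega)
    have f7 := eq_true (show (5:Int) < c by omega)
    simp only [f0, f1, f2, f3, f4, f5, f6, f7, and_true, and_false, true_and, false_and,
      if_true, if_false]
    simp [boxZ, boxOffN, f0, f1, f4, f5]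
  · exact absurd (show l ≤ 5 by omega) hl5
  · exact absurd (show l ≤ 5 by omega) hl5
  · exact absurd (show l ≤ 5 by omega) hl5
  · exact absurd (show l ≤ 5 by omega) hl5
  ·
    have f0 := eq_false (show ¬(l ≤ (2:Int)) by omega)
    have f1 := eq_true (show l ≤ (5:Int) by omega)
    have f2 := eq_true (show (2:Int) < l by omega)
    have f3 := eq_false (show ¬((5:Int) < l) by omega)
    have f4 := eq_true (show c ≤ (2:Int) by omega)
    have f5 := eq_true (show c ≤ (5:Int) by omega)
    have f6 := eq_false (show ¬((2:Int) < c) by omega)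
    have f7 := eq_false (show ¬((5:Int) < c) by omega)
    simp only [f0, f1, f2, f3, f4, f5, f6, f7, and_true, and_false, true_and, false_and,
      if_true, if_false]
    simp [boxZ, boxOffN, f0, f1, f4, f5]
  · exact absurd (show c ≤ 5 by omega) hc5
  ·
    have f0 := eq_false (show ¬(l ≤ (2:Int)) by omega)
    have f1 := eq_true (show l ≤ (5:Int) by omega)
    have f2 := eq_true (show (2:Int) < l by omega)
    have f3 := eq_false (show ¬((5:Int) < l) by omega)
    have f4 := eq_false (show ¬(c ≤ (2:Int)) by omega)
    have f5 := eq_true (show c ≤ (5:Int) by omega)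
    have f6 := eq_true (show (2:Int) < c by omega)
    have f7 := eq_false (show ¬((5:Int) < c) by omega)
    simp only [f0, f1, f2, f3, f4, f5, f6, f7, and_true, and_false, true_and, false_and,
      if_true, if_false]
    simp [boxZ, boxOffN, f0, f1, f4, f5]
  ·
    have f0 := eq_false (show ¬(l ≤ (2:Int)) by omega)
    have f1 := eq_true (show l ≤ (5:Int) by omega)
    have f2 := eq_true (show (2:Int) < l by omega)
    have f3 := eq_false (show ¬((5:Int) < l) by omega)
    have f4 := eq_false (show ¬(c ≤ (2:Int)) by omega)
    have f5 := eq_false (show ¬(c ≤ (5:Int)) by omega)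
    have f6 := eq_true (show (2:Int) < c by omega)
    have f7 := eq_true (show (5:Int) < c by omega)
    simp only [f0, f1, f2, f3, f4, f5, f6, f7, and_true, and_false, true_and, false_and,
      if_true, if_false]
    simp [boxZ, boxOffN, f0, f1, f4, f5]
  ·
    have f0 := eq_false (show ¬(l ≤ (2:Int)) by omega)
    have f1 := eq_false (show ¬(l ≤ (5:Int)) by omega)
    have f2 := eq_true (show (2:Int) < l by omega)
    have f3 := eq_true (show (5:Int) < l by omega)
    have f4 := eq_true (show c ≤ (2:Int) by omega)
    have f5 := eq_true (show c ≤ (5:Int) by omega)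
    have f6 := eq_false (show ¬((2:Int) < c) by omega)
    have f7 := eq_false (show ¬((5:Int) < c) by omega)
    simp only [f0, f1, f2, f3, f4, f5, f6, f7, and_true, and_false, true_and, false_and,
      if_true, if_false]
    simp [boxZ, boxOffN, f0, f1, f4, f5]
  · exact absurd (show c ≤ 5 by omega) hc5
  ·
    have f0 := eq_false (show ¬(l ≤ (2:Int)) by omega)
    have f1 := eq_false (show ¬(l ≤ (5:Int)) by omega)
    have f2 := eq_true (show (2:Int) < l by omega)
    have f3 := eq_true (show (5:Int) < l by omega)
    have f4 := eq_false (show ¬(c ≤ (2:Int)) by omega)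
    have f5 := eq_true (show c ≤ (5:Int) by omega)
    have f6 := eq_true (show (2:Int) < c by omega)
    have f7 := eq_false (show ¬((5:Int) < c) by omega)
    simp only [f0, f1, f2, f3, f4, f5, f6, f7, and_true, and_false, true_and, false_and,
      if_true, if_false]
    simp [boxZ, boxOffN, f0, f1, f4, f5]
  ·
    have f0 := eq_false (show ¬(l ≤ (2:Int)) by omega)
    have f1 := eq_false (show ¬(l ≤ (5:Int)) by omega)
    have f2 := eq_true (show (2:Int) < l by omega)
    have f3 := eq_true (show (5:Int) < l by omega)
    have f4 := eq_false (show ¬(c ≤ (2:Int)) by omega)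
    have f5 := eq_false (show ¬(c ≤ (5:Int)) by omega)
    have f6 := eq_true (show (2:Int) < c by omega)
    have f7 := eq_true (show (5:Int) < c by omega)
    simp only [f0, f1, f2, f3, f4, f5, f6, f7, and_true, and_false, true_and, false_and,
      if_true, if_false]
    simp [boxZ, boxOffN, f0, f1, f4, f5]


lemma off_arith (x : Int) :
    3 * ((if 2 < x then (1:Int) else 0) + (if 5 < x then (1:Int) else 0)) = ((boxOffN x : Nat) : Int) := by
  unfold boxOffN
  by_cases h2 : x ≤ 2 <;> by_cases h5 : x ≤ 5 <;>
    simp_all [show ¬(2 < x) ↔ x ≤ 2 by omega, show ¬(5 < x) ↔ x ≤ 5 by omega] <;> omega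

lemma alt_eq_boxZ (t : List (List Int)) (l c : Int) :
    zerocarre_alt t l c = boxZ t (boxOffN l) (boxOffN c) := by
  unfold zerocarre_alt
  rw [off_arith l, off_arith c]
  rw [show PySem.List.pyRange 0 9 1 = [0,1,2,3,4,5,6,7,8] from by decide]
  simp only [List.foldl_cons, List.foldl_nil]
  unfold boxZ
  rw [show List.range 3 = [0, 1, 2] from rfl]
  simp only [List.foldl_cons, List.foldl_nil]
  unfold setZI setZ
  norm_num [show PySem.Int.floordiv 0 3 = 0 from by decide,
    show PySem.Int.floordiv 1 3 = 0 from by decide,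
    show PySem.Int.floordiv 2 3 = 0 from by decide,
    show PySem.Int.floordiv 3 3 = 1 from by decide,
    show PySem.Int.floordiv 4 3 = 1 from by decide,
    show PySem.Int.floordiv 5 3 = 1 from by decide,
    show PySem.Int.floordiv 6 3 = 2 from by decide,
    show PySem.Int.floordiv 7 3 = 2 from by decide,
    show PySem.Int.floordiv 8 3 = 2 from by decide,
    show PySem.Int.mod 0 3 = 0 from by decide,
    show PySem.Int.mod 1 3 = 1 from by decide,
    show PySem.Int.mod 2 3 = 2 from by decide,
    show PySem.Int.mod 3 3 = 0 from by decide,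
    show PySem.Int.mod 4 3 = 1 from by decide,
    show PySem.Int.mod 5 3 = 2 from by decide,
    show PySem.Int.mod 6 3 = 0 from by decide,
    show PySem.Int.mod 7 3 = 1 from by decide,
    show PySem.Int.mod 8 3 = 2 from by decide,
    show ∀ (m : Nat), ((m : Int) + 0).toNat = 0 + m from fun m => by omega,
    show ∀ (m : Nat), ((m : Int) + 1).toNat = 1 + m from fun m => by omega,
    show ∀ (m : Nat), ((m : Int) + 2).toNat = 2 + m from fun m => by omega]

-- ===== VERDICT =====
theorem zerocarre_spec : Claim_equal_zerocarre := by
  intro t l c _ _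
  unfold Spec_zerocarre
  rw [zerocarre_eq_boxZ, alt_eq_boxZ]
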